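-- pv_equiv track=rewrite | github.com/Neel-132/KGEmbeddings | Gprocess/roach.py | nodemap
-- ===== SOURCE A (Python) =====
-- def nodemap(triple):
-- 	''' enumerates each tuple of a graph '''
--
-- 	key = {} # to store each encoding of a node
-- 	i = 0
--
-- 	for edge in triple:
-- 		for j in range(len(edge)):
-- 			if edge[j] in key: # if the node is already encoded then do nothing. If j is 1 implies edge[j] is an edge so we ignore
-- 				continue
--
-- 			else:
-- 				key[edge[j]] = i # encode the node
-- 				i += 1
--
-- 	return key
-- ===== SOURCE B (Python) =====
-- def nodemap(triple):
-- 	''' enumerates each tuple of a graph '''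
-- 	# different algorithm: record each node's first-occurrence position by a
-- 	# backward overwrite sweep, then sort the distinct nodes by that position
-- 	# and enumerate the sorted order.
-- 	flat = [x for edge in triple for x in edge]
-- 	first = {}
-- 	for pos, x in reversed(list(enumerate(flat))):
-- 		first[x] = pos  # last write (smallest pos) wins
-- 	nodes = sorted(first, key=first.get)
-- 	return {v: i for i, v in enumerate(nodes)}
-- ===== Notes on version B (the rewrite author's own statement) =====
-- stated objective: alternative
-- what changed: Replaces A's single-pass counter-incrementing dict build with a different algorithm: a backward overwrite sweep records each node's first-occurrence position, the distinct nodes are then sorted by that position and enumerated.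
import Mathlib
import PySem

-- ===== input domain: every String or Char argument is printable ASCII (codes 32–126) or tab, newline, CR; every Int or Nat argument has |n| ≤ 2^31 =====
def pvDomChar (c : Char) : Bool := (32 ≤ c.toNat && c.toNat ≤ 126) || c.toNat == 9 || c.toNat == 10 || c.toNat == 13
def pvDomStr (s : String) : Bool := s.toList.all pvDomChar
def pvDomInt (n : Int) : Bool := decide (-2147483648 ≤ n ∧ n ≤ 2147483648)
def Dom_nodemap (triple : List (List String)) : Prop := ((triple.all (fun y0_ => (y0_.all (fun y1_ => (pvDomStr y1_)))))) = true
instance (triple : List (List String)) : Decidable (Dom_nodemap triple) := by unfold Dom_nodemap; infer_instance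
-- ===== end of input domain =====

-- B re-derives the same node encoding by a different algorithm — a backward overwrite sweep records each node's first-occurrence position, the distinct nodes are sorted by that position and enumerated — instead of A's single pass with a running counter; objective: alternative, not faster.


-- ===== PORT A =====
def nodemap (triple : List (List String)) : List (String × Int) :=
  (triple.foldl (fun st edge =>
      (PySem.List.pyRange 0 (PySem.List.len edge) 1).foldl (fun st j =>
        let x := PySem.List.pyGetD edge j ""
        if st.1.contains x then st
        else (st.1.insert x st.2, st.2 + 1)) st)
    ((PySem.Dict.empty : PySem.Dict String Int), 0)).1.items

-- ===== PORT B =====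
def nodemap_alt (triple : List (List String)) : List (String × Int) :=
  let flat := triple.flatMap id
  let first := ((PySem.List.enumerate flat 0).reverse).foldl
    (fun d p => d.insert p.2 p.1) (PySem.Dict.empty : PySem.Dict String Int)
  let nodes := PySem.List.sorted first.keys (fun x => first.getD x 0) false
  (PySem.List.enumerate nodes 0).map (fun p => (p.2, p.1))

-- ===== PRECONDITION & SPEC =====
def Spec_nodemap (triple : List (List String)) (out : List (String × Int)) : Prop := out = nodemap_alt triple
instance (triple : List (List String)) (out : List (String × Int)) : Decidable (Spec_nodemap triple out) := by unfold Spec_nodemap; infer_instance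

-- ===== CLAIM (what is proved, stated in full; the proofs are below) =====
def Claim_equal_nodemap : Prop := ∀ (triple : List (List String)), Dom_nodemap triple → Spec_nodemap triple (nodemap triple)

-- ===== LEMMAS AND PROOFS =====

-- A's single-pass loop with counter produces items = enumerate(dedup of flattened input), swapped.
lemma nodemap_inv (xs : List String) :
    ∀ (u : List String) (d : PySem.Dict String Int), u.Nodup →
      d.items = (PySem.List.enumerate u 0).map (fun p => (p.2, p.1)) →
      (xs.foldl (fun st x =>
          if st.1.contains x then st
          else (st.1.insert x st.2, st.2 + 1)) (d, (u.length : Int))).1.items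
        = (PySem.List.enumerate (PySem.Set.update u xs) 0).map (fun p => (p.2, p.1)) := by
  induction xs with
  | nil => intro u d hu hd; simpa [PySem.Set.update_nil] using hd
  | cons x xs ih =>
    intro u d hu hd
    have hkeys : d.keys = u := by
      simp only [PySem.Dict.keys, hd, List.map_map]
      exact PySem.List.map_snd_enumerate u 0
    have hcont : d.contains x = decide (x ∈ u) := by
      rw [PySem.Dict.contains_eq_decide_mem_keys, hkeys]
    rw [PySem.Set.update_cons]
    by_cases hx : x ∈ u
    · simp only [List.foldl_cons, hcont, hx, decide_true, if_true, PySem.Set.add_of_mem hx]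
      exact ih u d hu hd
    · have hcf : d.contains x = false := by simp [hcont, hx]
      simp only [List.foldl_cons, hcf, if_false, Bool.false_eq_true,
        PySem.Set.add_of_not_mem hx]
      have hlen : (u.length : Int) + 1 = ((u ++ [x]).length : Int) := by
        simp
      have hitems : (d.insert x (u.length : Int)).items
          = (PySem.List.enumerate (u ++ [x]) 0).map (fun p => (p.2, p.1)) := by
        rw [PySem.Dict.items_insert, hcf, hd, PySem.List.enumerate_append]
        simp [PySem.List.enumerate_cons]
      have := ih (u ++ [x]) (d.insert x (u.length : Int))
        (by simp [List.nodup_append, hu]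
            exact fun a ha h => hx (h ▸ ha)) hitems
      rw [hlen]
      exact this

lemma nodemap_eq_flat (triple : List (List String)) :
    nodemap triple
      = (((triple.flatMap id).foldl (fun st x =>
          if st.1.contains x then st
          else (st.1.insert x st.2, st.2 + 1))
          ((PySem.Dict.empty : PySem.Dict String Int), 0))).1.items := by
  unfold nodemap
  congr 1
  rw [List.foldl_flatMap]
  have hf : (fun (st : PySem.Dict String Int × Int) (edge : List String) =>
      (PySem.List.pyRange 0 (PySem.List.len edge) 1).foldl (fun st j =>
        let x := PySem.List.pyGetD edge j ""
        if st.1.contains x then st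
        else (st.1.insert x st.2, st.2 + 1)) st)
      = (fun st (edge : List String) => (id edge).foldl (fun st x =>
        if st.1.contains x then st
        else (st.1.insert x st.2, st.2 + 1)) st) := by
    funext st edge
    have h := PySem.List.foldl_pyRange_pyGetD (xs := edge) (d := "")
      (f := fun (st : PySem.Dict String Int × Int) x => if st.1.contains x then st
        else (st.1.insert x st.2, st.2 + 1))
      (init := st) (a := 0) (by omega)
    simpa using h
  rw [hf]

lemma nodemap_eq_enum_dedup (triple : List (List String)) :
    nodemap triple
      = (PySem.List.enumerate (PySem.List.dedup (triple.flatMap id)) 0).map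
          (fun p => (p.2, p.1)) := by
  rw [nodemap_eq_flat]
  have h := nodemap_inv (triple.flatMap id) [] PySem.Dict.empty List.nodup_nil (by
    simp [PySem.Dict.empty, PySem.List.enumerate_nil])
  simpa [PySem.Set.update_nil_left, PySem.List.dedup_eq_ofList] using h

-- B's backward sweep: proof-side name for the first-occurrence dict.
def firstDict (flat : List String) : PySem.Dict String Int :=
  ((PySem.List.enumerate flat 0).reverse).foldl
    (fun d p => d.insert p.2 p.1) PySem.Dict.empty

lemma firstDict_foldr_get? (xs : List String) :
    ∀ (s : Int) (d0 : PySem.Dict String Int) (x : String),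
      ((PySem.List.enumerate xs s).foldr (fun p d => d.insert p.2 p.1) d0).get? x
        = if x ∈ xs then some (s + (List.idxOf x xs : Int)) else d0.get? x := by
  induction xs with
  | nil => intro s d0 x; simp [PySem.List.enumerate_nil]
  | cons y ys ih =>
    intro s d0 x
    rw [PySem.List.enumerate_cons]
    simp only [List.foldr_cons]
    by_cases hxy : x = y
    · subst hxy
      rw [PySem.Dict.get?_insert_self]
      simp
    · have hyx : (y == x) = false := by
        simp only [beq_eq_false_iff_ne, ne_eq]
        exact fun h => hxy h.symm
      rw [PySem.Dict.get?_insert_of_ne _ _ hxy, ih (s + 1)]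
      by_cases hx : x ∈ ys
      · simp only [hx, if_true, List.mem_cons, hxy, false_or, List.idxOf_cons, hyx, cond_false]
        congr 1
        push_cast
        ring
      · simp [hx, hxy]

lemma firstDict_get? (flat : List String) (x : String) :
    (firstDict flat).get? x
      = if x ∈ flat then some ((List.idxOf x flat : Int)) else none := by
  unfold firstDict
  rw [List.foldl_reverse, firstDict_foldr_get?]
  simp [PySem.Dict.get?_empty]

lemma firstDict_keys (flat : List String) :
    (firstDict flat).keys = PySem.List.dedup flat.reverse := by
  unfold firstDict
  rw [PySem.Dict.keys_foldl_insert_key (key := fun p : Int × String => p.2)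
    (f := fun _ p => p.1)]
  simp only [PySem.Dict.keys_empty, PySem.Set.update_nil_left, List.map_reverse,
    PySem.List.map_snd_enumerate, PySem.List.dedup_eq_ofList]

-- the dedup order is the order of first occurrence: first-occurrence indices strictly increase
lemma dedup_pairwise_idxOf (xs : List String) :
    (PySem.List.dedup xs).Pairwise (fun a b => List.idxOf a xs < List.idxOf b xs) := by
  induction xs using List.reverseRecOn with
  | nil => simp [PySem.List.dedup]
  | append_singleton ys x ih =>
    have hded : PySem.List.dedup (ys ++ [x]) = PySem.Set.add (PySem.List.dedup ys) x := by
      simp only [PySem.List.dedup_eq_ofList, PySem.Set.ofList_eq_foldl, List.foldl_append,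
        List.foldl_cons, List.foldl_nil]
    rw [hded]
    by_cases hx : x ∈ ys
    · have hmem : x ∈ PySem.List.dedup ys := by
        rw [PySem.List.mem_dedup]; exact hx
      rw [PySem.Set.add_of_mem hmem]
      refine List.Pairwise.imp_of_mem (fun {a b} ha hb hlt => ?_) ih
      have ha' : a ∈ ys := by rwa [← PySem.List.mem_dedup (xs := ys)]
      have hb' : b ∈ ys := by rwa [← PySem.List.mem_dedup (xs := ys)]
      rwa [List.idxOf_append, List.idxOf_append, if_pos ha', if_pos hb']
    · have hmem : x ∉ PySem.List.dedup ys := by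
        rw [PySem.List.mem_dedup]; exact hx
      rw [PySem.Set.add_of_not_mem hmem]
      rw [List.pairwise_append]
      refine ⟨?_, List.pairwise_singleton _ _, ?_⟩
      · refine List.Pairwise.imp_of_mem (fun {a b} ha hb hlt => ?_) ih
        have ha' : a ∈ ys := by rwa [← PySem.List.mem_dedup (xs := ys)]
        have hb' : b ∈ ys := by rwa [← PySem.List.mem_dedup (xs := ys)]
        rwa [List.idxOf_append, List.idxOf_append, if_pos ha', if_pos hb']
      · intro a ha b hb
        have hb' : b = x := List.mem_singleton.mp hb
        have ha' : a ∈ ys := by rwa [← PySem.List.mem_dedup (xs := ys)]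
        have h1 : List.idxOf a ys < ys.length := List.idxOf_lt_length_of_mem ha'
        have h2 : List.idxOf b [x] = 0 := by simp [hb']
        rw [List.idxOf_append, List.idxOf_append, if_pos ha', if_neg (hb' ▸ hx)]
        omega

-- sorting the recorded nodes by first-occurrence position recovers the dedup order
lemma sorted_firstDict (flat : List String) :
    PySem.List.sorted (firstDict flat).keys (fun x => (firstDict flat).getD x 0) false
      = PySem.List.dedup flat := by
  have hperm : (PySem.List.dedup flat).Perm (firstDict flat).keys := by
    rw [firstDict_keys]
    refine (List.perm_ext_iff_of_nodup (PySem.List.nodup_dedup _)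
      (PySem.List.nodup_dedup _)).mpr (fun a => ?_)
    simp
  have hpw : (PySem.List.dedup flat).Pairwise
      (fun a b => (firstDict flat).getD a 0 < (firstDict flat).getD b 0) := by
    refine List.Pairwise.imp_of_mem (fun {a b} ha hb hlt => ?_) (dedup_pairwise_idxOf flat)
    have ha' : a ∈ flat := by rwa [← PySem.List.mem_dedup (xs := flat)]
    have hb' : b ∈ flat := by rwa [← PySem.List.mem_dedup (xs := flat)]
    rw [PySem.Dict.getD_eq_get?_getD, PySem.Dict.getD_eq_get?_getD,
      firstDict_get?, firstDict_get?, if_pos ha', if_pos hb']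
    simpa using hlt
  exact PySem.List.sorted_eq_of_perm_of_pairwise_lt _ _ _ hperm hpw

-- ===== VERDICT (by name: the statement is the Claim_ definition above) =====
theorem nodemap_spec : Claim_equal_nodemap := by
  intro triple _
  unfold Spec_nodemap nodemap_alt
  have hB : PySem.List.sorted (firstDict (triple.flatMap id)).keys
      (fun x => (firstDict (triple.flatMap id)).getD x 0) false
      = PySem.List.dedup (triple.flatMap id) := sorted_firstDict (triple.flatMap id)
  rw [nodemap_eq_enum_dedup]
  exact congrArg (fun l => (PySem.List.enumerate l 0).map (fun p => (p.2, p.1))) hB.symm
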